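-- pv_equiv track=rewrite | github.com/jemtca/CodingBat | Python/Warmup-2/string_yak.py | string_yak
-- ===== SOURCE A (Python) =====
-- def string_yak(str):
-- 	s = ""
--
-- 	i = 0
-- 	while i < len(str):
-- 		if i < len(str)-2 and str[i] == 'y' and str[i+2] == 'k':
-- 			i += 3
-- 		else:
-- 			s = s + str[i]
-- 			i += 1
--
-- 	return s
-- ===== SOURCE B (Python) =====
-- import re
--
-- def string_yak(str):
--     return re.sub(r'y.k', '', str, flags=re.DOTALL)
-- ===== Notes on version B (the rewrite author's own statement) =====
-- stated objective: idiomatic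
-- what changed: Replaced the hand-written index loop that skips 3 on a match of y-anything-k (and builds the result by repeated string concatenation) with a single regex substitution using re.sub with DOTALL; the engine's leftmost non-overlapping matching reproduces the scan exactly.
import Mathlib
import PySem

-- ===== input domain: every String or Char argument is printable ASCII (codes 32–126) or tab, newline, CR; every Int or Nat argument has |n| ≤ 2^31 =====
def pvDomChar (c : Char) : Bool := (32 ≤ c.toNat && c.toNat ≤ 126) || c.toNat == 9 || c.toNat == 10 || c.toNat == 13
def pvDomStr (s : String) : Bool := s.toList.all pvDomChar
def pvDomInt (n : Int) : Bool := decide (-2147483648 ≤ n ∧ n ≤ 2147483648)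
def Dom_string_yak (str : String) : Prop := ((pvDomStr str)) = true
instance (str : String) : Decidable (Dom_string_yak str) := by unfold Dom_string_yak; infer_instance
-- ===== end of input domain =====

-- B replaces A's hand-written index loop by a regex substitution re.sub(r'y.k','',s,re.DOTALL)
-- (ported as: find leftmost match, splice it out, continue after it); objective: idiomatic.

-- ===== PORT A =====
-- A's while loop: look at the current position; if at least 3 chars remain and they
-- match 'y' _ 'k', advance by 3 keeping nothing, else keep one char and advance by 1.
def yakLoopA : List Char → List Char
  | c0 :: c1 :: c2 :: rest =>
      if c0 = 'y' ∧ c2 = 'k' then yakLoopA rest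
      else c0 :: yakLoopA (c1 :: c2 :: rest)
  | c :: rest => c :: yakLoopA rest
  | [] => []
termination_by l => l.length

def string_yak (str : String) : String := String.mk (yakLoopA str.toList)

-- ===== PORT B =====
-- the regex engine's search for the leftmost match of y.k (DOTALL): returns the
-- text before the match and the text after it, or none if no match exists.
def findYak : List Char → Option (List Char × List Char)
  | c0 :: c1 :: c2 :: rest =>
      if c0 = 'y' ∧ c2 = 'k' then some ([], rest)
      else (findYak (c1 :: c2 :: rest)).map (fun pr => (c0 :: pr.1, pr.2))
  | _ => none

theorem findYak_shrink : ∀ (l p r : List Char), findYak l = some (p, r) → r.length < l.length := by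
  intro l
  induction l with
  | nil => intro p r h; simp [findYak] at h
  | cons c0 t ih =>
    intro p r h
    match t, h with
    | [], h => simp [findYak] at h
    | [c1], h => simp [findYak] at h
    | c1 :: c2 :: rest, h =>
      simp only [findYak] at h
      split at h
      · simp at h
        obtain ⟨hp, hr⟩ := h
        rw [← hr]; simp; omega
      · cases hf : findYak (c1 :: c2 :: rest) with
        | none => rw [hf] at h; simp at h
        | some pr =>
          rw [hf] at h; simp at h
          obtain ⟨hp, hr⟩ := h
          have hlt : pr.2.length < (c1 :: c2 :: rest).length := ih pr.1 pr.2 (by rw [hf])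
          rw [← hr]
          simp at hlt ⊢
          omega

-- re.sub: repeatedly take the leftmost non-overlapping match, emit the gap, continue.
def yakSubB (l : List Char) : List Char :=
  match h : findYak l with
  | none => l
  | some pr => pr.1 ++ yakSubB pr.2
termination_by l.length
decreasing_by exact findYak_shrink l pr.1 pr.2 h

def string_yak_alt (str : String) : String := String.mk (yakSubB str.toList)

-- ===== PRECONDITION & SPEC =====
def Spec_string_yak (str : String) (out : String) : Prop := out = string_yak_alt str
instance (str : String) (out : String) : Decidable (Spec_string_yak str out) := by unfold Spec_string_yak; infer_instance

-- ===== CLAIM (what is proved, stated in full; the proofs are below) =====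
def Claim_equal_string_yak : Prop := ∀ (str : String), Dom_string_yak str → Spec_string_yak str (string_yak str)

-- ===== LEMMAS AND PROOFS =====

theorem yakA_of_findYak_none : ∀ (l : List Char), findYak l = none → yakLoopA l = l := by
  intro l
  induction l with
  | nil => intro _; simp [yakLoopA]
  | cons c0 t ih =>
    intro h
    match t, h, ih with
    | [], _, _ => simp [yakLoopA]
    | [c1], _, _ => simp [yakLoopA]
    | c1 :: c2 :: rest, h, ih =>
      simp only [findYak] at h
      split at h
      · simp at h
      · rename_i hc
        cases hf : findYak (c1 :: c2 :: rest) with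
        | none =>
          simp only [yakLoopA, if_neg hc]
          rw [ih hf]
        | some pr => rw [hf] at h; simp at h

theorem yakA_of_findYak_some : ∀ (l p r : List Char), findYak l = some (p, r) →
    yakLoopA l = p ++ yakLoopA r := by
  intro l
  induction l with
  | nil => intro p r h; simp [findYak] at h
  | cons c0 t ih =>
    intro p r h
    match t, h, ih with
    | [], h, _ => simp [findYak] at h
    | [c1], h, _ => simp [findYak] at h
    | c1 :: c2 :: rest, h, ih =>
      simp only [findYak] at h
      split at h
      · rename_i hc
        simp at h
        obtain ⟨hp, hr⟩ := h
        subst hp; subst hr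
        simp [yakLoopA, if_pos hc]
      · rename_i hc
        cases hf : findYak (c1 :: c2 :: rest) with
        | none => rw [hf] at h; simp at h
        | some pr =>
          rw [hf] at h; simp at h
          obtain ⟨hp, hr⟩ := h
          simp only [yakLoopA, if_neg hc]
          rw [ih pr.1 pr.2 (by rw [hf] )]
          rw [← hp, ← hr]
          simp

theorem yakA_eq_yakB : ∀ (l : List Char), yakLoopA l = yakSubB l := by
  intro l
  induction hn : l.length using Nat.strong_induction_on generalizing l with
  | _ n ih =>
    subst hn
    rw [yakSubB]
    cases hf : findYak l with
    | none => exact yakA_of_findYak_none l hf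
    | some pr =>
      rw [yakA_of_findYak_some l pr.1 pr.2 (by rw [hf])]
      rw [ih pr.2.length (findYak_shrink l pr.1 pr.2 hf) pr.2 rfl]

-- ===== VERDICT (by name: the statement is the Claim_ definition above) =====
theorem string_yak_spec : Claim_equal_string_yak := by
  intro str _
  unfold Spec_string_yak string_yak string_yak_alt
  rw [yakA_eq_yakB]
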